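-- pv_equiv track=rewrite | github.com/pdegidio/cortex-homelab | scripts/cortex-monitor.py | filter_noise
-- ===== SOURCE A (Python) =====
-- def filter_noise(log_text: str, patterns: list[str], debug: bool = False) -> tuple[str, int]:
--     """
--     Remove lines matching any noise pattern.
--     Returns (filtered_log, suppressed_count).
--     """
--     if not patterns or not log_text:
--         return log_text, 0
--
--     lines = log_text.splitlines()
--     filtered = []
--     suppressed = 0
--
--     for line in lines:
--         if any(p.lower() in line.lower() for p in patterns if p.strip()):
--             suppressed += 1
--         else:
--             filtered.append(line)
--
--     return "\n".join(filtered), suppressed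
-- ===== SOURCE B (Python) =====
-- def filter_noise(log_text: str, patterns: list[str], debug: bool = False) -> tuple[str, int]:
--     """
--     Remove lines matching any noise pattern.
--     Returns (filtered_log, suppressed_count).
--     """
--     if not patterns or not log_text:
--         return log_text, 0
--
--     # Index the lowered non-blank patterns by their first character, so a line is
--     # scanned position by position and only patterns starting with the character at
--     # that position are ever tried (position-major scan with a first-char index,
--     # instead of A's pattern-major "p in line" scan).
--     buckets: dict[str, list[str]] = {}
--     for p in patterns:
--         if p.strip():
--             q = p.lower()
--             buckets.setdefault(q[0], []).append(q)
--
--     filtered = []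
--     suppressed = 0
--     for line in log_text.splitlines():
--         low = line.lower()
--         hit = False
--         for i in range(len(low)):
--             for q in buckets.get(low[i], []):
--                 if low.startswith(q, i):
--                     hit = True
--                     break
--             if hit:
--                 break
--         if hit:
--             suppressed += 1
--         else:
--             filtered.append(line)
--
--     return "\n".join(filtered), suppressed
-- ===== Notes on version B (the rewrite author's own statement) =====
-- stated objective: alternative
-- what changed: B replaces A's pattern-major scan (run 'p in line' for every pattern on every line, re-lowercasing both each time) with a position-major scan over a first-character index: the lowered non-blank patterns are bucketed once by their first character, and each lowered line is walked once, trying at each position only the bucket of the character at that position (startswith at that offset); the inner all-patterns substring search disappears.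
import Mathlib
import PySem

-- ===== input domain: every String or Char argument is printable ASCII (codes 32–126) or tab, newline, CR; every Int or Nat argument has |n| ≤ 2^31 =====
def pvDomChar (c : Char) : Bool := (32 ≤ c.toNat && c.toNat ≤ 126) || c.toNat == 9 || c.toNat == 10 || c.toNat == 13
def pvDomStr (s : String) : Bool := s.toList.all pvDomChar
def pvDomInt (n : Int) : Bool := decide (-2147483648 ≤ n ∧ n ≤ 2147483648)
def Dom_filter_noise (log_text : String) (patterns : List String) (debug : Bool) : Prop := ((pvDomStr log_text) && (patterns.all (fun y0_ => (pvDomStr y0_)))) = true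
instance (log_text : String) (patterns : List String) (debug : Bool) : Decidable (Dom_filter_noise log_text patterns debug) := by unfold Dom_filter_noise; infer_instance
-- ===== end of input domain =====

-- B replaces A's pattern-major scan (try every pattern's substring search on every line) by a
-- position-major scan with a first-character index: the lowered non-blank patterns are bucketed
-- once by their first character, and each lowered line is walked once, trying at each position
-- only the bucket of the character found there; same return value ("alternative" objective).

-- ===== PORT A =====
def filter_noise (log_text : String) (patterns : List String) (debug : Bool) : String × Int :=
  if patterns = [] ∨ log_text = "" then (log_text, 0)
  else
    let lines := PySem.Str.splitlines log_text
    let st := lines.foldl (fun (st : List String × Int) line =>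
      if patterns.any (fun p =>
          decide (PySem.Str.strip p ≠ "") &&
          PySem.Str.isIn (PySem.Str.lower p) (PySem.Str.lower line)) then
        (st.1, st.2 + 1)
      else
        (st.1 ++ [line], st.2)) ([], 0)
    (PySem.Str.join "\n" st.1, st.2)

-- ===== PORT B =====
-- q[0] of a pattern stored in the index; exact: only nonempty q are ever stored or looked up
def pvKey (q : String) : Char := q.toList.headD ' '

-- buckets.setdefault(q[0], []).append(q) over the non-blank patterns
def pvBuckets (patterns : List String) : PySem.Dict Char (List String) :=
  patterns.foldl (fun d p =>
    if PySem.Str.strip p = "" then d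
    else
      let q := PySem.Str.lower p
      d.modify (pvKey q) [] (· ++ [q])) PySem.Dict.empty

-- "for i in range(len(low)): for q in buckets.get(low[i], []): if low.startswith(q, i): …"
-- walked as structural recursion over the suffixes of the lowered line
def pvHitScan (bk : PySem.Dict Char (List String)) : List Char → Bool
  | [] => false
  | c :: rest =>
      (bk.getD c []).any (fun q => PySem.Chars.startswith (c :: rest) q.toList)
      || pvHitScan bk rest

def filter_noise_alt (log_text : String) (patterns : List String) (debug : Bool) : String × Int :=
  if patterns = [] ∨ log_text = "" then (log_text, 0)
  else
    let bk := pvBuckets patterns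
    let st := (PySem.Str.splitlines log_text).foldl (fun (st : List String × Int) line =>
      if pvHitScan bk (PySem.Str.lower line).toList then
        (st.1, st.2 + 1)
      else
        (st.1 ++ [line], st.2)) ([], 0)
    (PySem.Str.join "\n" st.1, st.2)

-- ===== PRECONDITION & SPEC =====
def Spec_filter_noise (log_text : String) (patterns : List String) (debug : Bool) (out : String × Int) : Prop := out = filter_noise_alt log_text patterns debug
instance (log_text : String) (patterns : List String) (debug : Bool) (out : String × Int) : Decidable (Spec_filter_noise log_text patterns debug out) := by unfold Spec_filter_noise; infer_instance

-- ===== CLAIM =====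
def Claim_equal_filter_noise : Prop := ∀ (log_text : String) (patterns : List String) (debug : Bool), Dom_filter_noise log_text patterns debug → Spec_filter_noise log_text patterns debug (filter_noise log_text patterns debug)

-- ===== LEMMAS AND PROOFS =====

-- the lowered non-blank patterns, as a list
def pvLows (patterns : List String) : List String :=
  (patterns.filter (fun p => decide (PySem.Str.strip p ≠ ""))).map PySem.Str.lower

-- every stored pattern is nonempty
theorem pv_lows_ne_nil (patterns : List String) :
    ∀ q ∈ pvLows patterns, q.toList ≠ [] := by
  intro q hq
  simp only [pvLows, List.mem_map, List.mem_filter] at hq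
  obtain ⟨p, ⟨_, hp⟩, rfl⟩ := hq
  have hpl : p.toList ≠ [] := by
    intro hn
    simp only [decide_eq_true_eq] at hp
    exact hp (by rw [String.toList_eq_nil_iff.mp hn]; rfl)
  simp [PySem.Chars.lower, hpl]

-- the index holds, under each character, exactly the stored patterns starting with it
theorem pv_buckets_getD_aux (patterns : List String) (d : PySem.Dict Char (List String)) (c : Char) :
    (patterns.foldl (fun d p =>
      if PySem.Str.strip p = "" then d
      else
        let q := PySem.Str.lower p
        d.modify (pvKey q) [] (· ++ [q])) d).getD c []
    = d.getD c [] ++ (pvLows patterns).filter (fun q => pvKey q = c) := by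
  induction patterns generalizing d with
  | nil => simp [pvLows]
  | cons p t ih =>
    by_cases hp : PySem.Str.strip p = ""
    · simp [hp, ih, pvLows]
    · simp only [List.foldl_cons, hp, if_false, ih]
      rw [PySem.Dict.getD_modify]
      by_cases hk : c = pvKey (PySem.Str.lower p)
      · simp [pvLows, hp, hk.symm, List.append_assoc]
      · have : ¬ pvKey (PySem.Str.lower p) = c := fun h => hk h.symm
        simp [pvLows, hp, hk, this]

theorem pv_buckets_getD (patterns : List String) (c : Char) :
    (pvBuckets patterns).getD c [] = (pvLows patterns).filter (fun q => pvKey q = c) := by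
  simpa [PySem.Dict.getD_empty] using pv_buckets_getD_aux patterns PySem.Dict.empty c

-- the position-major scan finds a hit iff some stored pattern is a substring
theorem pv_hitScan_eq (patterns : List String) (l : List Char) :
    pvHitScan (pvBuckets patterns) l
      = (pvLows patterns).any (fun q => PySem.Chars.isIn q.toList l) := by
  induction l with
  | nil =>
    show false = _
    symm
    rw [List.any_eq_false]
    intro q hq hin
    exact pv_lows_ne_nil patterns q hq
      (List.infix_nil.mp ((PySem.Chars.isIn_iff_infix _ _).mp hin))
  | cons c rest ih =>
    apply Bool.coe_iff_coe.mp
    simp only [pvHitScan, Bool.or_eq_true, ih, pv_buckets_getD,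
      List.any_eq_true, List.mem_filter, PySem.Chars.isIn_iff_infix,
      PySem.Chars.startswith_iff, List.infix_cons_iff, decide_eq_true_eq]
    constructor
    · rintro (⟨q, ⟨hq, _⟩, hpre⟩ | ⟨q, hq, hinf⟩)
      · exact ⟨q, hq, Or.inl hpre⟩
      · exact ⟨q, hq, Or.inr hinf⟩
    · rintro ⟨q, hq, hpre | hinf⟩
      · refine Or.inl ⟨q, ⟨hq, ?_⟩, hpre⟩
        obtain ⟨t, ht⟩ := hpre
        have hne := pv_lows_ne_nil patterns q hq
        cases hql : q.toList with
        | nil => exact absurd hql hne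
        | cons a as =>
          rw [hql] at ht
          have : a = c := by
            have := congrArg (List.headD · ' ') ht
            simpa using this
          simp [pvKey, hql, this]
      · exact Or.inr ⟨q, hq, hinf⟩

-- the two per-line noise tests agree
theorem pv_pred_eq (patterns : List String) (line : String) :
    (patterns.any (fun p =>
        decide (PySem.Str.strip p ≠ "") &&
        PySem.Str.isIn (PySem.Str.lower p) (PySem.Str.lower line)))
      = pvHitScan (pvBuckets patterns) (PySem.Str.lower line).toList := by
  rw [pv_hitScan_eq]
  apply Bool.coe_iff_coe.mp
  simp only [List.any_eq_true, Bool.and_eq_true, decide_eq_true_eq, pvLows,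
    List.mem_map, List.mem_filter]
  constructor
  · rintro ⟨p, hp, hs, hin⟩
    exact ⟨PySem.Str.lower p, ⟨p, ⟨hp, by simpa using hs⟩, rfl⟩, by simpa using hin⟩
  · rintro ⟨q, ⟨p, ⟨hp, hs⟩, rfl⟩, hin⟩
    exact ⟨p, hp, by simpa using hs, by simpa using hin⟩

-- ===== VERDICT =====
theorem filter_noise_spec : Claim_equal_filter_noise := by
  intro log_text patterns debug _
  show filter_noise log_text patterns debug = filter_noise_alt log_text patterns debug
  unfold filter_noise filter_noise_alt
  by_cases h : patterns = [] ∨ log_text = ""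
  · simp [h]
  · simp only [h, if_false]
    have : (fun (st : List String × Int) line =>
        if patterns.any (fun p =>
            decide (PySem.Str.strip p ≠ "") &&
            PySem.Str.isIn (PySem.Str.lower p) (PySem.Str.lower line)) then
          (st.1, st.2 + 1)
        else (st.1 ++ [line], st.2))
      = (fun (st : List String × Int) line =>
        if pvHitScan (pvBuckets patterns) (PySem.Str.lower line).toList then
          (st.1, st.2 + 1)
        else (st.1 ++ [line], st.2)) := by
      funext st line
      rw [pv_pred_eq]
    rw [this]
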